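-- pv_equiv track=rewrite | github.com/watchfog/IGNITE | src/auto_gamevideo_subtitles/pipeline.py | _last_true_run_start
-- ===== SOURCE A (Python) =====
-- def _last_true_run_start(flags: list[bool]) -> int | None:
--     true_idx = [i for i, v in enumerate(flags) if v]
--     if not true_idx:
--         return None
--     run_end = true_idx[-1]
--     run_start = run_end
--     while run_start > 0 and flags[run_start - 1]:
--         run_start -= 1
--     return run_start
-- ===== SOURCE B (Python) =====
-- def _last_true_run_start(flags: list[bool]) -> int | None:
--     ans = None
--     run_start = None
--     for i, v in enumerate(flags):
--         if v:
--             if run_start is None: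
--                 run_start = i
--                 ans = i
--         else:
--             run_start = None
--     return ans
-- ===== Notes on version B (the rewrite author's own statement) =====
-- stated objective: simpler
-- what changed: A single forward fold that tracks the start of the current True run (and records it as the answer when a new run begins) replaces A's two-phase build-the-list-of-all-True-indices then backward while-loop.
import Mathlib
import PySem

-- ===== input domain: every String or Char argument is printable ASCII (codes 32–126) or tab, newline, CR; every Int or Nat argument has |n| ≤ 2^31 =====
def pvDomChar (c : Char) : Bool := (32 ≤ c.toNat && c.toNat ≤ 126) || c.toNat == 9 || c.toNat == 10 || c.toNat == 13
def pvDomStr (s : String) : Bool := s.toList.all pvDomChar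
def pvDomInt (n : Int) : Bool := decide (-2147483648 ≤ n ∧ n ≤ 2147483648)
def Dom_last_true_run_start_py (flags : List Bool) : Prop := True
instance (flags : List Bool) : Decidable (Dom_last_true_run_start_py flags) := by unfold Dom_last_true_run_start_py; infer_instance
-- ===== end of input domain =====

-- B replaces A's build-all-True-indices-then-walk-back with one forward fold tracking the
-- current run's start; same O(n) cost, simpler single pass (return value equivalence).

-- ===== PORT A =====
-- the 'while run_start > 0 and flags[run_start - 1]: run_start -= 1' loop;
-- flags[run_start - 1] is read with pyGetD (the index is always in range when reached)
def pvALoop (flags : List Bool) (run_start : Int) : Int :=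
  if 0 < run_start ∧ PySem.List.pyGetD flags (run_start - 1) false = true then
    pvALoop flags (run_start - 1)
  else run_start
termination_by run_start.toNat
decreasing_by omega

def last_true_run_start_py (flags : List Bool) : Option Int :=
  let true_idx := ((PySem.List.enumerate flags 0).filter (fun p => p.2)).map (fun p => p.1)
  if true_idx = [] then none
  else some (pvALoop flags (PySem.List.pyGetD true_idx (-1) 0))

-- ===== PORT B =====
-- one fold over enumerate(flags); state = (ans, run_start), both Option Int
def pvBStep (st : Option Int × Option Int) (p : Int × Bool) : Option Int × Option Int :=
  if p.2 then
    match st.2 with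
    | none => (some p.1, some p.1)
    | some _ => st
  else (st.1, none)

def last_true_run_start_py_alt (flags : List Bool) : Option Int :=
  ((PySem.List.enumerate flags 0).foldl pvBStep (none, none)).1

-- ===== PRECONDITION & SPEC =====
def Spec_last_true_run_start_py (flags : List Bool) (out : Option Int) : Prop := out = last_true_run_start_py_alt flags
instance (flags : List Bool) (out : Option Int) : Decidable (Spec_last_true_run_start_py flags out) := by unfold Spec_last_true_run_start_py; infer_instance

-- ===== CLAIM (what is proved, stated in full; the proofs are below) =====
def Claim_equal_last_true_run_start_py : Prop := ∀ (flags : List Bool), Dom_last_true_run_start_py flags → Spec_last_true_run_start_py flags (last_true_run_start_py flags)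

-- ===== LEMMAS AND PROOFS =====

-- B's fold state after processing the whole list
def pvBState (flags : List Bool) : Option Int × Option Int :=
  (PySem.List.enumerate flags 0).foldl pvBStep (none, none)

-- the invariant tying B's state to A's answer
def pvInv (l : List Bool) : Prop :=
  (pvBState l).1 = last_true_run_start_py l ∧
  (match (pvBState l).2 with
   | none => l.getLast? ≠ some true
   | some s => (pvBState l).1 = some s ∧ ∃ t : Nat, s = (t : Int) ∧ t < l.length ∧
       (∀ j : Nat, t ≤ j → j < l.length → l.getD j false = true) ∧
       (t = 0 ∨ l.getD (t - 1) false = false))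

theorem pvInv_nil : pvInv [] := by
  constructor
  · rfl
  · simp [pvBState, PySem.List.enumerate]

theorem pvBState_append (l : List Bool) (b : Bool) :
    pvBState (l ++ [b]) = pvBStep (pvBState l) ((l.length : Int), b) := by
  simp [pvBState, PySem.List.enumerate_append, PySem.List.enumerate, List.foldl_append]

def pvTrueIdx (l : List Bool) : List Int :=
  ((PySem.List.enumerate l 0).filter (fun p => p.2)).map (fun p => p.1)

theorem pvTrueIdx_append (l : List Bool) (b : Bool) :
    pvTrueIdx (l ++ [b]) = pvTrueIdx l ++ (if b then [(l.length : Int)] else []) := by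
  cases b <;>
    simp [pvTrueIdx, PySem.List.enumerate_append, PySem.List.enumerate, List.filter_append]

theorem pvA_eq (l : List Bool) :
    last_true_run_start_py l =
      (if pvTrueIdx l = [] then none
       else some (pvALoop l (PySem.List.pyGetD (pvTrueIdx l) (-1) 0))) := rfl

-- pvALoop only reads indices < run_start, so it ignores appended elements
theorem pvALoop_congr (l1 l2 : List Bool) (i : Int)
    (h : ∀ j : Int, 0 ≤ j → j < i → PySem.List.pyGetD l1 j false = PySem.List.pyGetD l2 j false) :
    pvALoop l1 i = pvALoop l2 i := by
  by_cases hc1 : 0 < i ∧ PySem.List.pyGetD l1 (i - 1) false = true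
  · have hi := hc1.1
    have hc2 : 0 < i ∧ PySem.List.pyGetD l2 (i - 1) false = true :=
      ⟨hi, by rw [← h (i - 1) (by omega) (by omega)]; exact hc1.2⟩
    conv_lhs => rw [pvALoop]
    conv_rhs => rw [pvALoop]
    rw [if_pos hc1, if_pos hc2]
    exact pvALoop_congr l1 l2 (i - 1) (fun j hj hj' => h j hj (by omega))
  · have hc2 : ¬ (0 < i ∧ PySem.List.pyGetD l2 (i - 1) false = true) := by
      intro hcon
      have hi := hcon.1
      exact hc1 ⟨hi, by rw [h (i - 1) (by omega) (by omega)]; exact hcon.2⟩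
    conv_lhs => rw [pvALoop]
    conv_rhs => rw [pvALoop]
    rw [if_neg hc1, if_neg hc2]
termination_by i.toNat
decreasing_by have := hc1.1; omega

theorem pvGetD_append_lt (l : List Bool) (b : Bool) (j : Nat) (hj : j < l.length) :
    (l ++ [b]).getD j false = l.getD j false := by
  simp [List.getD_eq_getElem?_getD, List.getElem?_append_left hj]

theorem pvGetD_append_self (l : List Bool) (b : Bool) :
    (l ++ [b]).getD l.length false = b := by
  simp [List.getD_eq_getElem?_getD]

theorem pvPyGetD_toNat (l : List Bool) (j : Int) (hj : 0 ≤ j) :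
    PySem.List.pyGetD l j false = l.getD j.toNat false := by
  have h2 : j = (j.toNat : Int) := by omega
  rw [h2, PySem.List.pyGetD_natCast]
  congr 1

-- the backward loop lands exactly on the start of a trailing true run
theorem pvALoop_reach (l : List Bool) (t n : Nat) (hle : t ≤ n)
    (hrun : ∀ j : Nat, t ≤ j → j < n → l.getD j false = true)
    (hstart : t = 0 ∨ l.getD (t - 1) false = false) :
    pvALoop l (n : Int) = (t : Int) := by
  induction n with
  | zero => rw [pvALoop]; simp; omega
  | succ m ih =>
    by_cases heq : t = m + 1
    · subst heq
      rcases hstart with h0 | hfalse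
      · omega
      · have hcond : ¬ ((0 : Int) < ((m + 1 : Nat) : Int) ∧
            PySem.List.pyGetD l (((m + 1 : Nat) : Int) - 1) false = true) := by
          rintro ⟨-, hc⟩
          rw [pvPyGetD_toNat _ _ (by omega)] at hc
          have he : ((((m + 1 : Nat)) : Int) - 1).toNat = m + 1 - 1 := by omega
          rw [he, hfalse] at hc
          exact Bool.false_ne_true hc
        rw [pvALoop, if_neg hcond]
    · have htm : t ≤ m := by omega
      have hread : PySem.List.pyGetD l (((m + 1 : Nat) : Int) - 1) false = true := by
        rw [pvPyGetD_toNat _ _ (by omega)]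
        have he : (((m + 1 : Nat) : Int) - 1).toNat = m := by omega
        rw [he]; exact hrun m htm (by omega)
      have hpos : (0 : Int) < ((m + 1 : Nat) : Int) := by omega
      rw [pvALoop, if_pos ⟨hpos, hread⟩]
      have he : ((m + 1 : Nat) : Int) - 1 = ((m : Nat) : Int) := by omega
      rw [he]
      exact ih htm (fun j hj hj' => hrun j hj (by omega))

theorem pvInv_snoc (l : List Bool) (b : Bool) (h : pvInv l) : pvInv (l ++ [b]) := by
  obtain ⟨hans, hrs⟩ := h
  cases b with
  | false =>
    -- state becomes (ans, none); A unchanged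
    have hA : last_true_run_start_py (l ++ [false]) = last_true_run_start_py l := by
      rw [pvA_eq, pvA_eq, pvTrueIdx_append]
      simp only [if_false, List.append_nil, Bool.false_eq_true]
      by_cases hnil : pvTrueIdx l = []
      · simp [hnil]
      · simp only [hnil, if_false]
        congr 1
        apply pvALoop_congr
        intro j hj hj'
        have hmem : PySem.List.pyGetD (pvTrueIdx l) (-1) 0 ∈ pvTrueIdx l := by
          have hne : pvTrueIdx l ≠ [] := hnil
          rw [PySem.List.pyGetD_neg_one _ _ hne]
          exact List.getLast_mem hne
        have hlt : j < (l.length : Int) := by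
          -- every element of pvTrueIdx l is < l.length
          obtain ⟨p, hp, hp1⟩ := List.mem_map.mp hmem
          obtain ⟨k, hk, hpk⟩ := (PySem.List.mem_enumerate_iff _ _ _).mp (List.mem_of_mem_filter hp)
          have : p.1 = (k : Int) := by rw [hpk]; simp
          omega
        rw [pvPyGetD_toNat _ _ hj, pvPyGetD_toNat _ _ hj,
            pvGetD_append_lt l false j.toNat (by omega)]
    have hstep : pvBState (l ++ [false]) = ((pvBState l).1, none) := by
      rw [pvBState_append]; rfl
    constructor
    · rw [hstep, hA]; exact hans
    · rw [hstep]
      show (l ++ [false]).getLast? ≠ some true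
      simp
  | true =>
    have hA' : pvTrueIdx (l ++ [true]) = pvTrueIdx l ++ [(l.length : Int)] := by
      rw [pvTrueIdx_append]; simp
    have hidx : PySem.List.pyGetD (pvTrueIdx (l ++ [true])) (-1) 0 = (l.length : Int) := by
      rw [hA']; exact PySem.List.pyGetD_neg_one_append_singleton _ _ _
    cases hst : (pvBState l).2 with
    | none =>
      -- new run begins at l.length
      have hlast : l.getLast? ≠ some true := by rw [hst] at hrs; exact hrs
      have hAval : last_true_run_start_py (l ++ [true]) = some (l.length : Int) := by
        rw [pvA_eq, hA']
        rw [if_neg (by simp)]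
        rw [← hA', hidx]
        congr 1
        rw [pvALoop]
        by_cases hl : l = []
        · subst hl; simp
        · have hfalse : PySem.List.pyGetD (l ++ [true]) ((l.length : Int) - 1) false = false := by
            rw [pvPyGetD_toNat _ _ (by
              have := List.length_pos_iff.mpr hl; omega)]
            have hlen : ((l.length : Int) - 1).toNat = l.length - 1 := by omega
            rw [hlen]
            have hpos : 0 < l.length := List.length_pos_iff.mpr hl
            rw [pvGetD_append_lt l true (l.length - 1) (by omega)]
            cases hgl : l.getLast? with
            | none => simp [List.getLast?_eq_none_iff] at hgl; exact absurd hgl hl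
            | some v =>
              cases v with
              | true => exact absurd hgl hlast
              | false =>
                have : l.getD (l.length - 1) false = false := by
                  have := List.getLast?_eq_getElem? (l := l)
                  rw [hgl] at this
                  simp [List.getD_eq_getElem?_getD, ← this]
                exact this
          simp [hfalse]
      have hstep : pvBState (l ++ [true]) = (some (l.length : Int), some (l.length : Int)) := by
        rw [pvBState_append]
        simp only [pvBStep]
        rw [hst]
        simp
      constructor
      · rw [hstep, hAval]
      · rw [hstep]
        refine ⟨rfl, l.length, rfl,
          by simp only [List.length_append, List.length_cons, List.length_nil]; omega, ?_, ?_⟩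
        · intro j hj hj'
          simp only [List.length_append, List.length_cons, List.length_nil] at hj'
          have hje : j = l.length := by omega
          subst hje
          exact pvGetD_append_self l true
        · by_cases hl : l = []
          · left; subst hl; rfl
          · right
            have hpos : 0 < l.length := List.length_pos_iff.mpr hl
            rw [pvGetD_append_lt l true (l.length - 1) (by omega)]
            cases hgl : l.getLast? with
            | none => simp [List.getLast?_eq_none_iff] at hgl; exact absurd hgl hl
            | some v =>
              cases v with
              | true => exact absurd hgl hlast
              | false =>
                have := List.getLast?_eq_getElem? (l := l)
                rw [hgl] at this
                simp [List.getD_eq_getElem?_getD, ← this]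
    | some s =>
      rw [hst] at hrs
      obtain ⟨hans_s, t, hts, htlt, hrun, hstart⟩ := hrs
      -- the trailing run of l ++ [true] still starts at t
      have hrun' : ∀ j : Nat, t ≤ j → j < (l ++ [true]).length → (l ++ [true]).getD j false = true := by
        intro j hj hj'
        simp only [List.length_append, List.length_cons, List.length_nil] at hj'
        by_cases hje : j = l.length
        · subst hje; exact pvGetD_append_self l true
        · rw [pvGetD_append_lt l true j (by omega)]
          exact hrun j hj (by omega)
      have hstart' : t = 0 ∨ (l ++ [true]).getD (t - 1) false = false := by
        rcases hstart with h0 | hf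
        · left; exact h0
        · right; rw [pvGetD_append_lt l true (t - 1) (by omega)]; exact hf
      have hAval : last_true_run_start_py (l ++ [true]) = some (t : Int) := by
        rw [pvA_eq, hA']
        rw [if_neg (by simp)]
        rw [← hA', hidx]
        congr 1
        exact pvALoop_reach (l ++ [true]) t l.length (by omega)
          (fun j hj hj' => hrun' j hj
            (by simp only [List.length_append, List.length_cons, List.length_nil]; omega))
          hstart'
      have hstep : pvBState (l ++ [true]) = pvBState l := by
        rw [pvBState_append]
        simp only [pvBStep]
        rw [hst]
        simp
      constructor
      · rw [hstep, hans_s, hts, hAval]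
      · rw [hstep, hst]
        refine ⟨hans_s, t, hts, ?_, hrun', hstart'⟩
        simp only [List.length_append, List.length_cons, List.length_nil]
        omega

theorem pvInv_all (l : List Bool) : pvInv l := by
  induction l using List.reverseRecOn with
  | nil => exact pvInv_nil
  | append_singleton l b ih => exact pvInv_snoc l b ih

-- ===== VERDICT (by name: the statement is the Claim_ definition above) =====
theorem last_true_run_start_py_spec : Claim_equal_last_true_run_start_py := by
  intro flags _
  unfold Spec_last_true_run_start_py
  have h := (pvInv_all flags).1
  unfold last_true_run_start_py_alt
  rw [← h]; rfl
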